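-- pv_equiv track=rewrite | github.com/LiamK21/GH-bot-Rust | card_sorting_eval.py | _is_mozilla_repo_dir
-- ===== SOURCE A (Python) =====
-- from enum import StrEnum
--
-- class Repository(StrEnum):
--     GLEAN = "glean"
--     GRCOV = "grcov"
--     NEQO = "neqo"
--     RUST_CODE_ANALYSIS = "rust-code-analysis"
--
-- def _is_mozilla_repo_dir(dir_name: str) -> bool:
--     dir_parts = dir_name.split("_")
--     if len(dir_parts) != 2:
--         return False
--     owner, repo = dir_parts
--     if owner != "mozilla":
--         return False
--     if repo not in [e.value for e in Repository]:
--         return False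
--     return True
-- ===== SOURCE B (Python) =====
-- from enum import StrEnum
--
-- class Repository(StrEnum):
--     GLEAN = "glean"
--     GRCOV = "grcov"
--     NEQO = "neqo"
--     RUST_CODE_ANALYSIS = "rust-code-analysis"
--
-- _VALID_DIR_NAMES = frozenset("mozilla_" + e.value for e in Repository)
--
-- def _is_mozilla_repo_dir(dir_name: str) -> bool:
--     return dir_name in _VALID_DIR_NAMES
-- ===== Notes on version B (the rewrite author's own statement) =====
-- stated objective: simpler
-- what changed: The split/length/owner/value-list parsing pipeline is replaced by a single membership test in a precomputed frozenset of the four fully-qualified directory names; exact because no repository value contains an underscore.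
import Mathlib
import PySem

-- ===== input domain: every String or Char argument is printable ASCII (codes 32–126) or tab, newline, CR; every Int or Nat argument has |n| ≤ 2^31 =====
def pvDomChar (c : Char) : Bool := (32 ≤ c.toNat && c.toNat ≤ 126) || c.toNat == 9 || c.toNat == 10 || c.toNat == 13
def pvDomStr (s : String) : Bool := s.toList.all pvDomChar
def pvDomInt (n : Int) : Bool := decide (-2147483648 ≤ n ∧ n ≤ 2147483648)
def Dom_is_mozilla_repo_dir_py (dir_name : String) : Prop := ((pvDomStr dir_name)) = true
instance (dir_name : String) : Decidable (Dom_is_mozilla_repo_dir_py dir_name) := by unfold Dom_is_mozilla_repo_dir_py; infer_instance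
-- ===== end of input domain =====

-- B replaces A's split/length/owner/value-list parsing with one membership test
-- in a precomputed set of the four fully-qualified directory names (objective: simpler).


-- ===== PORT A =====
-- [e.value for e in Repository]
def repositoryValues : List String := ["glean", "grcov", "neqo", "rust-code-analysis"]

def is_mozilla_repo_dir_py (dir_name : String) : Bool :=
  match PySem.Str.split? dir_name "_" with
  | none => false  -- unreachable: the separator "_" is non-empty
  | some dir_parts =>
    if dir_parts.length ≠ 2 then false
    else
      match dir_parts with
      | [owner, repo] =>
        if owner ≠ "mozilla" then false
        else if ¬ repositoryValues.contains repo then false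
        else true
      | _ => false

-- ===== PORT B =====
-- {'mozilla_' + e.value for e in Repository}, precomputed once
def validDirNames : PySem.Set String :=
  PySem.Set.ofList (repositoryValues.map (fun v => "mozilla_" ++ v))

def is_mozilla_repo_dir_py_alt (dir_name : String) : Bool :=
  PySem.Set.contains validDirNames dir_name

-- ===== PRECONDITION & SPEC =====
def Spec_is_mozilla_repo_dir_py (dir_name : String) (out : Bool) : Prop := out = is_mozilla_repo_dir_py_alt dir_name
instance (dir_name : String) (out : Bool) : Decidable (Spec_is_mozilla_repo_dir_py dir_name out) := by unfold Spec_is_mozilla_repo_dir_py; infer_instance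

-- ===== CLAIM (what is proved, stated in full; the proofs are below) =====
def Claim_equal_is_mozilla_repo_dir_py : Prop := ∀ (dir_name : String), Dom_is_mozilla_repo_dir_py dir_name → Spec_is_mozilla_repo_dir_py dir_name (is_mozilla_repo_dir_py dir_name)

-- ===== LEMMAS AND PROOFS =====

-- proof-only reference splitter: split a char list on '_' (pre = chars of the current piece)
def mySplit : List Char → List Char → List (List Char)
  | pre, [] => [pre]
  | pre, c :: rest => if c = '_' then pre :: mySplit [] rest else mySplit (pre ++ [c]) rest

theorem go_eq (fuel : Nat) : ∀ (l cur : List Char) (acc : List (List Char)), l.length ≤ fuel →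
    PySem.Chars.splitOn.go ['_'] fuel l cur acc = acc.reverse ++ mySplit cur.reverse l := by
  induction fuel with
  | zero =>
    intro l cur acc h
    have : l = [] := List.eq_nil_of_length_eq_zero (Nat.le_zero.mp h)
    subst this
    simp [PySem.Chars.splitOn.go, mySplit]
  | succ f ih =>
    intro l cur acc h
    cases l with
    | nil => simp [PySem.Chars.splitOn.go, mySplit]
    | cons c rest =>
      rw [PySem.Chars.splitOn.go.eq_def]
      by_cases hc : c = '_'
      · subst hc
        have hp : List.isPrefixOf ['_'] ('_' :: rest) = true := by simp [List.isPrefixOf]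
        simp only [hp, if_true, List.length_cons, List.length_nil, List.drop_succ_cons, List.drop_zero] at *
        rw [ih rest [] (cur.reverse :: acc) (by simpa using Nat.lt_succ_iff.mp (Nat.lt_of_lt_of_le (Nat.lt_succ_self _) h))]
        simp [mySplit]
      · have hp : List.isPrefixOf ['_'] (c :: rest) = false := by
          simp [List.isPrefixOf]
          exact fun h => hc h.symm
        simp only [hp, Bool.false_eq_true, if_false]
        rw [ih rest (c :: cur) acc (by simpa using Nat.succ_le_succ_iff.mp h)]
        simp [mySplit, hc]

theorem splitOn_eq_mySplit (l : List Char) :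
    PySem.Chars.splitOn l ['_'] = mySplit [] l := by
  have := go_eq (l.length + 1) l [] [] (Nat.le_succ _)
  simpa [PySem.Chars.splitOn] using this

theorem mySplit_ne_nil (l pre : List Char) : mySplit pre l ≠ [] := by
  induction l generalizing pre with
  | nil => simp [mySplit]
  | cons c rest ih =>
    by_cases hc : c = '_' <;> simp [mySplit, hc, ih]

theorem mySplit_single (l : List Char) : ∀ (pre z : List Char), mySplit pre l = [z] → z = pre ++ l := by
  induction l with
  | nil => intro pre z h; simp [mySplit] at h; simp [h]
  | cons c rest ih =>
    intro pre z h
    by_cases hc : c = '_'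
    · subst hc
      simp [mySplit] at h
      exact absurd h.2 (mySplit_ne_nil rest [])
    · simp [mySplit, hc] at h
      have := ih (pre ++ [c]) z h
      simp [this]

theorem mySplit_pair (l : List Char) : ∀ (pre x y : List Char),
    mySplit pre l = [x, y] → pre ++ l = x ++ '_' :: y := by
  induction l with
  | nil => intro pre x y h; simp [mySplit] at h
  | cons c rest ih =>
    intro pre x y h
    by_cases hc : c = '_'
    · subst hc
      simp [mySplit] at h
      obtain ⟨hx, hy⟩ := h
      have := mySplit_single rest [] y hy
      simp [hx, this]
    · simp [mySplit, hc] at h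
      have := ih (pre ++ [c]) x y h
      simpa using this

theorem a_true_imp (s : String) (h : is_mozilla_repo_dir_py s = true) :
    s = "mozilla_glean" ∨ s = "mozilla_grcov" ∨ s = "mozilla_neqo" ∨ s = "mozilla_rust-code-analysis" := by
  unfold is_mozilla_repo_dir_py at h
  rw [show PySem.Str.split? s "_" =
      some ((PySem.Chars.splitOn s.toList ['_']).map String.ofList) by
    simp [PySem.Str.split?, PySem.Chars.split?]] at h
  rw [splitOn_eq_mySplit] at h
  -- extract the two pieces
  rcases hms : mySplit [] s.toList with _ | ⟨x, _ | ⟨y, _ | ⟨z, t⟩⟩⟩ <;>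
    simp [hms] at h
  obtain ⟨how, hrep⟩ := h
  have hsl : s.toList = x ++ '_' :: y := by
    have := mySplit_pair s.toList [] x y hms
    simpa using this
  have hx : x = "mozilla".toList := by
    have := congrArg String.toList how
    simpa using this
  have hs : s = String.ofList (x ++ '_' :: y) := by
    apply String.toList_injective; simp [hsl]
  simp [repositoryValues] at hrep
  rcases hrep with hr | hr | hr | hr <;>
  · have hy := congrArg String.toList hr
    simp at hy
    rw [hs, hx, hy]
    decide

theorem b_true_imp (s : String) (h : is_mozilla_repo_dir_py_alt s = true) :
    s = "mozilla_glean" ∨ s = "mozilla_grcov" ∨ s = "mozilla_neqo" ∨ s = "mozilla_rust-code-analysis" := by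
  unfold is_mozilla_repo_dir_py_alt validDirNames at h
  rw [PySem.Set.contains_iff, PySem.Set.mem_ofList] at h
  simpa [repositoryValues] using h

-- ===== VERDICT (by name: the statement is the Claim_ definition above) =====
theorem is_mozilla_repo_dir_py_spec : Claim_equal_is_mozilla_repo_dir_py := by
  intro s _
  unfold Spec_is_mozilla_repo_dir_py
  rcases ha : is_mozilla_repo_dir_py s with _ | _
  · rcases hb : is_mozilla_repo_dir_py_alt s with _ | _
    · rfl
    · rcases b_true_imp s hb with h | h | h | h <;> subst h <;> revert ha <;> decide
  · rcases a_true_imp s ha with h | h | h | h <;> subst h <;> decide
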